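-- pv_equiv track=rewrite | github.com/amritanshkm/CITS4403-Project | src/data_prep.py | _pick_rate_col
-- ===== SOURCE A (Python) =====
-- def _pick_rate_col(cols):
--     cols = list(cols)
--     for c in cols:
--         cl = str(c).lower()
--         if "seasonally" in cl and "adjusted" in cl and ("unemployment" in cl or "rate" in cl): return c
--     for c in cols:
--         cl = str(c).lower()
--         if "unemployment" in cl and "rate" in cl: return c
--     for c in cols:
--         cl = str(c).lower()
--         if "unemployment" in cl: return c
--     for c in cols:
--         cl = str(c).lower()
--         if "rate" in cl: return c
--     return cols[-1] if len(cols)>0 else None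
-- ===== SOURCE B (Python) =====
-- def _pick_rate_col(cols):
--     cols = list(cols)
--     best_rank, best = 4, None
--     for c in cols:
--         cl = str(c).lower()
--         if "seasonally" in cl and "adjusted" in cl and ("unemployment" in cl or "rate" in cl):
--             r = 0
--         elif "unemployment" in cl and "rate" in cl:
--             r = 1
--         elif "unemployment" in cl:
--             r = 2
--         elif "rate" in cl:
--             r = 3
--         else:
--             r = 4
--         if r < best_rank:
--             best_rank, best = r, c
--     if best_rank < 4:
--         return best
--     return cols[-1] if len(cols) > 0 else None
-- ===== Notes on version B (the rewrite author's own statement) =====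
-- stated objective: alternative
-- what changed: Replaces A's four sequential full-list scans by a single pass that computes a priority rank per column and keeps the first column of the best (lowest) rank seen.
import Mathlib
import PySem

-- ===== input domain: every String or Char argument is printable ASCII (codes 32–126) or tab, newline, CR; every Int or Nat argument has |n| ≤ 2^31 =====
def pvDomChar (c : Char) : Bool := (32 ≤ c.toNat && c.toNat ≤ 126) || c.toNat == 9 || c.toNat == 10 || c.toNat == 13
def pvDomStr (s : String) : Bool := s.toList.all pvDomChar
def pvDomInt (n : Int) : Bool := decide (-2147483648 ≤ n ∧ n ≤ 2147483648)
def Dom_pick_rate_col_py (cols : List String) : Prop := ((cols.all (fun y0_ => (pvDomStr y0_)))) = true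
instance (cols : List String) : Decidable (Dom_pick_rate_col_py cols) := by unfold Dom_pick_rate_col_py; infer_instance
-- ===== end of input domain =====

-- B replaces A's four sequential full-list scans by a single pass keeping the first column of the best priority rank; alternative decomposition, same result.


-- ===== PORT A =====
-- the four loop conditions of A, named (each is the literal Python condition on cl = c.lower())
def pvC0 (c : String) : Bool :=
  let cl := PySem.Str.lower c
  PySem.Str.isIn "seasonally" cl && PySem.Str.isIn "adjusted" cl &&
    (PySem.Str.isIn "unemployment" cl || PySem.Str.isIn "rate" cl)
def pvC1 (c : String) : Bool :=
  let cl := PySem.Str.lower c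
  PySem.Str.isIn "unemployment" cl && PySem.Str.isIn "rate" cl
def pvC2 (c : String) : Bool := PySem.Str.isIn "unemployment" (PySem.Str.lower c)
def pvC3 (c : String) : Bool := PySem.Str.isIn "rate" (PySem.Str.lower c)

-- each 'for c in cols: if cond: return c' loop is the first-match scan List.find?
def pick_rate_col_py (cols : List String) : Option String :=
  match cols.find? pvC0 with
  | some c => some c
  | none =>
    match cols.find? pvC1 with
    | some c => some c
    | none =>
      match cols.find? pvC2 with
      | some c => some c
      | none =>
        match cols.find? pvC3 with
        | some c => some c
        | none => if 0 < cols.length then PySem.List.pyGet? cols (-1) else none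

-- ===== PORT B =====
-- priority rank of a column (the if/elif chain of Source B)
def pvRank (c : String) : Nat :=
  if pvC0 c then 0
  else if pvC1 c then 1
  else if pvC2 c then 2
  else if pvC3 c then 3
  else 4

def pick_rate_col_py_alt (cols : List String) : Option String :=
  let st := cols.foldl
    (fun (st : Nat × Option String) c =>
      if pvRank c < st.1 then (pvRank c, some c) else st) (4, none)
  if st.1 < 4 then st.2
  else if 0 < cols.length then PySem.List.pyGet? cols (-1) else none

-- ===== PRECONDITION & SPEC =====
def Spec_pick_rate_col_py (cols : List String) (out : Option String) : Prop := out = pick_rate_col_py_alt cols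
instance (cols : List String) (out : Option String) : Decidable (Spec_pick_rate_col_py cols out) := by unfold Spec_pick_rate_col_py; infer_instance

-- ===== CLAIM (what is proved, stated in full; the proofs are below) =====
def Claim_equal_pick_rate_col_py : Prop := ∀ (cols : List String), Dom_pick_rate_col_py cols → Spec_pick_rate_col_py cols (pick_rate_col_py cols)

-- ===== LEMMAS AND PROOFS =====

-- running minimum of the ranks, as B's fold maintains it in the first component
def pvMin (cols : List String) (r : Nat) : Nat :=
  cols.foldl (fun a c => min a (pvRank c)) r

lemma pvMin_le_init (cols : List String) : ∀ r, pvMin cols r ≤ r := by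
  induction cols with
  | nil => intro r; simp [pvMin]
  | cons c t ih =>
    intro r
    have := ih (min r (pvRank c))
    simp only [pvMin, List.foldl_cons] at this ⊢
    omega

lemma pvMin_le_mem (cols : List String) : ∀ r c, c ∈ cols → pvMin cols r ≤ pvRank c := by
  induction cols with
  | nil => intro r c h; simp at h
  | cons a t ih =>
    intro r c h
    rcases List.mem_cons.mp h with h | h
    · subst h
      have := pvMin_le_init t (min r (pvRank c))
      simp only [pvMin, List.foldl_cons] at this ⊢
      omega
    · exact ih _ c h

lemma le_pvMin (cols : List String) : ∀ r k, k ≤ r → (∀ c ∈ cols, k ≤ pvRank c) → k ≤ pvMin cols r := by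
  induction cols with
  | nil => intro r k hk _; simpa [pvMin]
  | cons a t ih =>
    intro r k hk h
    have ha := h a (List.mem_cons_self ..)
    simp only [pvMin, List.foldl_cons]
    exact ih _ k (by omega) (fun c hc => h c (List.mem_cons_of_mem _ hc))

lemma find?_congr_mem {α : Type} (l : List α) (p q : α → Bool)
    (h : ∀ x ∈ l, p x = q x) : l.find? p = l.find? q := by
  induction l with
  | nil => rfl
  | cons a t ih =>
    have ha := h a (List.mem_cons_self ..)
    simp only [List.find?_cons, ha]
    cases q a with
    | true => rfl
    | false => exact ih (fun x hx => h x (List.mem_cons_of_mem _ hx))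

-- characterisation of B's fold: first component is the running minimum, second the first
-- element attaining it (when it improved on the initial bound)
lemma fold_spec (cols : List String) : ∀ (r : Nat) (acc : Option String),
    cols.foldl (fun (st : Nat × Option String) c =>
      if pvRank c < st.1 then (pvRank c, some c) else st) (r, acc)
    = (pvMin cols r,
       if pvMin cols r < r then cols.find? (fun c => decide (pvRank c = pvMin cols r)) else acc) := by
  induction cols with
  | nil => intro r acc; simp [pvMin]
  | cons a t ih =>
    intro r acc
    simp only [List.foldl_cons]
    by_cases h : pvRank a < r
    · have hmin : min r (pvRank a) = pvRank a := by omega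
      have hM : pvMin (a :: t) r = pvMin t (pvRank a) := by
        simp [pvMin, hmin]
      have hle : pvMin t (pvRank a) ≤ pvRank a := pvMin_le_init t _
      rw [if_pos h, ih]
      rw [hM]
      by_cases he : pvRank a = pvMin t (pvRank a)
      · have : ¬ pvMin t (pvRank a) < pvRank a := by omega
        rw [if_neg this, if_pos (by omega)]
        rw [List.find?_cons_of_pos (by exact decide_eq_true he)]
      · have hlt : pvMin t (pvRank a) < pvRank a := by omega
        rw [if_pos hlt, if_pos (by omega)]
        rw [List.find?_cons_of_neg (by simp; omega)]
    · have hmin : min r (pvRank a) = r := by omega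
      have hM : pvMin (a :: t) r = pvMin t r := by simp [pvMin, hmin]
      rw [if_neg h, ih, hM]
      by_cases hlt : pvMin t r < r
      · rw [if_pos hlt, if_pos hlt]
        rw [List.find?_cons_of_neg (by simp; omega)]
      · rw [if_neg hlt, if_neg hlt]

lemma pvRank_eq_zero (c : String) : (decide (pvRank c = 0)) = pvC0 c := by
  unfold pvRank; split_ifs <;> simp_all

lemma pvRank_eq_one (c : String) (h : pvC0 c = false) : (decide (pvRank c = 1)) = pvC1 c := by
  unfold pvRank; split_ifs <;> simp_all

lemma pvRank_eq_two (c : String) (h0 : pvC0 c = false) (h1 : pvC1 c = false) :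
    (decide (pvRank c = 2)) = pvC2 c := by
  unfold pvRank; split_ifs <;> simp_all

lemma pvRank_eq_three (c : String) (h0 : pvC0 c = false) (h1 : pvC1 c = false) (h2 : pvC2 c = false) :
    (decide (pvRank c = 3)) = pvC3 c := by
  unfold pvRank; split_ifs <;> simp_all

lemma pvRank_ge_one (c : String) (h : pvC0 c = false) : 1 ≤ pvRank c := by
  unfold pvRank; split_ifs <;> simp_all

lemma pvRank_ge_two (c : String) (h0 : pvC0 c = false) (h1 : pvC1 c = false) : 2 ≤ pvRank c := by
  unfold pvRank; split_ifs <;> simp_all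

lemma pvRank_ge_three (c : String) (h0 : pvC0 c = false) (h1 : pvC1 c = false)
    (h2 : pvC2 c = false) : 3 ≤ pvRank c := by
  unfold pvRank; split_ifs <;> simp_all

lemma pvRank_eq_four (c : String) (h0 : pvC0 c = false) (h1 : pvC1 c = false)
    (h2 : pvC2 c = false) (h3 : pvC3 c = false) : pvRank c = 4 := by
  unfold pvRank; simp [h0, h1, h2, h3]

-- ===== VERDICT (by name: the statement is the Claim_ definition above) =====
theorem pick_rate_col_py_spec : Claim_equal_pick_rate_col_py := by
  intro cols _
  unfold Spec_pick_rate_col_py pick_rate_col_py pick_rate_col_py_alt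
  rw [fold_spec]
  simp only
  cases h0 : cols.find? pvC0 with
  | some c =>
    have hm : c ∈ cols := List.mem_of_find?_eq_some h0
    have hp : pvC0 c = true := List.find?_some h0
    have hr : pvRank c = 0 := by unfold pvRank; simp [hp]
    have hM : pvMin cols 4 = 0 := Nat.le_zero.mp (hr ▸ pvMin_le_mem cols 4 c hm)
    rw [hM]
    have hfind : cols.find? (fun x => decide (pvRank x = 0)) = some c := by
      rw [find?_congr_mem cols _ pvC0 (fun x _ => pvRank_eq_zero x)]; exact h0
    simp [hfind]
  | none =>
    have hF0 : ∀ x ∈ cols, pvC0 x = false := by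
      intro x hx
      simpa using List.find?_eq_none.mp h0 x hx
    cases h1 : cols.find? pvC1 with
    | some c =>
      have hm : c ∈ cols := List.mem_of_find?_eq_some h1
      have hp : pvC1 c = true := List.find?_some h1
      have hr : pvRank c = 1 := by unfold pvRank; simp [hF0 c hm, hp]
      have hle : pvMin cols 4 ≤ 1 := hr ▸ pvMin_le_mem cols 4 c hm
      have hge : 1 ≤ pvMin cols 4 :=
        le_pvMin cols 4 1 (by omega) (fun x hx => pvRank_ge_one x (hF0 x hx))
      have hM : pvMin cols 4 = 1 := by omega
      have hfind : cols.find? (fun x => decide (pvRank x = 1)) = some c := by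
        rw [find?_congr_mem cols _ pvC1 (fun x hx => pvRank_eq_one x (hF0 x hx))]; exact h1
      simp [hM, hfind]
    | none =>
      have hF1 : ∀ x ∈ cols, pvC1 x = false := by
        intro x hx
        simpa using List.find?_eq_none.mp h1 x hx
      cases h2 : cols.find? pvC2 with
      | some c =>
        have hm : c ∈ cols := List.mem_of_find?_eq_some h2
        have hp : pvC2 c = true := List.find?_some h2
        have hr : pvRank c = 2 := by unfold pvRank; simp [hF0 c hm, hF1 c hm, hp]
        have hle : pvMin cols 4 ≤ 2 := hr ▸ pvMin_le_mem cols 4 c hm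
        have hge : 2 ≤ pvMin cols 4 :=
          le_pvMin cols 4 2 (by omega) (fun x hx => pvRank_ge_two x (hF0 x hx) (hF1 x hx))
        have hM : pvMin cols 4 = 2 := by omega
        have hfind : cols.find? (fun x => decide (pvRank x = 2)) = some c := by
          rw [find?_congr_mem cols _ pvC2 (fun x hx => pvRank_eq_two x (hF0 x hx) (hF1 x hx))]
          exact h2
        simp [hM, hfind]
      | none =>
        have hF2 : ∀ x ∈ cols, pvC2 x = false := by
          intro x hx
          simpa using List.find?_eq_none.mp h2 x hx
        cases h3 : cols.find? pvC3 with
        | some c =>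
          have hm : c ∈ cols := List.mem_of_find?_eq_some h3
          have hp : pvC3 c = true := List.find?_some h3
          have hr : pvRank c = 3 := by
            unfold pvRank; simp [hF0 c hm, hF1 c hm, hF2 c hm, hp]
          have hle : pvMin cols 4 ≤ 3 := hr ▸ pvMin_le_mem cols 4 c hm
          have hge : 3 ≤ pvMin cols 4 :=
            le_pvMin cols 4 3 (by omega)
              (fun x hx => pvRank_ge_three x (hF0 x hx) (hF1 x hx) (hF2 x hx))
          have hM : pvMin cols 4 = 3 := by omega
          have hfind : cols.find? (fun x => decide (pvRank x = 3)) = some c := by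
            rw [find?_congr_mem cols _ pvC3
              (fun x hx => pvRank_eq_three x (hF0 x hx) (hF1 x hx) (hF2 x hx))]
            exact h3
          simp [hM, hfind]
        | none =>
          have hF3 : ∀ x ∈ cols, pvC3 x = false := by
            intro x hx
            simpa using List.find?_eq_none.mp h3 x hx
          have hge : 4 ≤ pvMin cols 4 :=
            le_pvMin cols 4 4 (by omega)
              (fun x hx => (pvRank_eq_four x (hF0 x hx) (hF1 x hx) (hF2 x hx) (hF3 x hx)).ge)
          have hM : pvMin cols 4 = 4 := by
            have := pvMin_le_init cols 4; omega
          simp [hM]
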